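-- pv_equiv track=rewrite | github.com/marcepanowyy/AlgorithmsDataStructures | practice/extra/bit_algo/dp/amazon_stairs.py | amazon_stairs
-- ===== SOURCE A (Python) =====
-- def amazon_stairs(A):
--
--     n = len(A)
--     T = [0] * n
--     T[0] = 1
--
--     for i in range(1, n):
--         num = A[i]
--         k = i+1
--         T[i] += T[i-1]
--         while num != 0 and k < n:
--             T[k] += 1
--             k += 1
--             num -= 1
--
--     return T[n-1]
-- ===== SOURCE B (Python) =====
-- def amazon_stairs(A):
--     # Closed form, one pass: the answer is 1 plus, for each j >= 1, the number
--     # of indices to the right of j that the range-increment started at j covers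
--     # (clipped at the last index; a negative A[j] covers everything rightward).
--     n = len(A)
--     total = 1
--     for j in range(1, n):
--         a = A[j]
--         reach = n - 1 - j
--         total += reach if a < 0 else min(a, reach)
--     return total
-- ===== Notes on version B (the rewrite author's own statement) =====
-- stated objective: faster
-- what changed: Replaces the DP table with nested range-increment loops by a single pass summing, per index, the clipped length of its increment range (closed form for the final prefix-accumulated cell).
import Mathlib
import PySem

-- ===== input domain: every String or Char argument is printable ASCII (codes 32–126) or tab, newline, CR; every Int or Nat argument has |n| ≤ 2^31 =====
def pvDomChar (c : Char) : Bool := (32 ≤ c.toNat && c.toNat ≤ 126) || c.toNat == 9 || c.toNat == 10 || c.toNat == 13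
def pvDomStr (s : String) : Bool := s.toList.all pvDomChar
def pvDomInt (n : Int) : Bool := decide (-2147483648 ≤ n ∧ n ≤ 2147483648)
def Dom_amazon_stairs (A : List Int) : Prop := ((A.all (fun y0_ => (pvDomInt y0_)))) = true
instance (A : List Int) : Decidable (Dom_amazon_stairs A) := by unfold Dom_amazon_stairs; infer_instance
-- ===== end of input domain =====

-- B replaces A's nested range-increment DP by a single pass summing, per index,
-- the clipped length of its increment range (same return value on Pre_).

-- ===== PORT A =====
-- inner 'while num != 0 and k < n' loop of A: T[k] += 1; k += 1; num -= 1
def pvInnerA (n : Nat) (T : Array Int) (num : Int) (k : Nat) : Array Int :=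
  if _h : num ≠ 0 ∧ k < n then
    pvInnerA n (T.modify k (· + 1)) (num - 1) (k + 1)
  else T
termination_by n - k
decreasing_by omega

-- body of A's 'for i in range(1, n)' loop
def pvStepA (A : List Int) (T : Array Int) (i : Nat) : Array Int :=
  let n := A.length
  let num := A.getD i 0
  let T := T.setIfInBounds i (T.getD i 0 + T.getD (i - 1) 0)
  pvInnerA n T num (i + 1)

def amazon_stairs (A : List Int) : Int :=
  let n := A.length
  -- T = [0]*n; T[0] = 1  (on empty A Python raises IndexError here; Pre_ excludes [])
  let T0 := (Array.replicate n (0 : Int)).setIfInBounds 0 1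
  let Tf := (List.range' 1 (n - 1)).foldl (pvStepA A) T0
  Tf.getD (n - 1) 0

-- ===== PORT B =====
def amazon_stairs_alt (A : List Int) : Int :=
  let n := A.length
  (List.range' 1 (n - 1)).foldl (fun total j =>
    let a := A.getD j 0
    let reach : Int := (n : Int) - 1 - (j : Int)
    total + (if a < 0 then reach else min a reach)) 1

-- ===== PRECONDITION & SPEC =====
-- Pre_ excludes only the empty list, on which A raises IndexError at 'T[0] = 1'.
def Pre_amazon_stairs (A : List Int) : Prop := A ≠ []
instance (A : List Int) : Decidable (Pre_amazon_stairs A) := by unfold Pre_amazon_stairs; infer_instance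
def pvWitness_amazon_stairs : List Int := [2, 1, 0]

def Spec_amazon_stairs (A : List Int) (out : Int) : Prop := out = amazon_stairs_alt A
instance (A : List Int) (out : Int) : Decidable (Spec_amazon_stairs A out) := by unfold Spec_amazon_stairs; infer_instance

-- ===== CLAIM (what is proved, stated in full; the proofs are below) =====
def Claim_equal_amazon_stairs : Prop := ∀ (A : List Int), Dom_amazon_stairs A → Pre_amazon_stairs A → Spec_amazon_stairs A (amazon_stairs A)

-- ===== LEMMAS AND PROOFS =====

-- indicator: does iteration j's inner loop add 1 at position m?
def pvCov (A : List Int) (n j m : Nat) : Int :=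
  if 1 ≤ j ∧ j + 1 ≤ m ∧ m < n ∧ (A.getD j 0 < 0 ∨ (m : Int) < (j : Int) + 1 + A.getD j 0) then 1 else 0

theorem pvInnerA_size (n : Nat) (T : Array Int) (num : Int) (k : Nat) :
    (pvInnerA n T num k).size = T.size := by
  fun_induction pvInnerA with
  | case1 T num k h ih => simpa using ih
  | case2 => rfl

theorem pvInnerA_getD (n : Nat) (T : Array Int) (num : Int) (k : Nat) (hT : T.size = n) (m : Nat) :
    (pvInnerA n T num k).getD m 0 =
      T.getD m 0 + (if k ≤ m ∧ m < n ∧ (num < 0 ∨ (m : Int) < (k : Int) + num) then 1 else 0) := by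
  fun_induction pvInnerA with
  | case1 T num k h ih =>
    rw [ih (by simpa using hT)]
    rcases h with ⟨hnum, hk⟩
    by_cases hm : m = k
    · subst hm
      rw [Array.getD_eq_getD_getElem?, Array.getD_eq_getD_getElem?, Array.getElem?_modify]
      have hsome : T[m]? = some (T[m]'(by omega)) := Array.getElem?_eq_getElem (by omega)
      rw [if_pos rfl, hsome]
      have h0 : ¬ (m + 1 ≤ m ∧ m < n ∧ (num - 1 < 0 ∨ (m:Int) < (↑(m+1):Int) + (num-1))) := by omega
      have h2 : (m ≤ m ∧ m < n ∧ (num < 0 ∨ (m:Int) < (m:Int) + num)) := ⟨le_refl _, hk, by omega⟩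
      rw [if_neg h0, if_pos h2]
      simp
    · have hmod : (T.modify k (· + 1)).getD m 0 = T.getD m 0 := by
        rw [Array.getD_eq_getD_getElem?, Array.getD_eq_getD_getElem?, Array.getElem?_modify]
        simp [Ne.symm hm]
      rw [hmod]
      have h1 : ((k+1 ≤ m ∧ m < n ∧ (num - 1 < 0 ∨ (m:Int) < (↑(k+1):Int) + (num-1))) ↔
          (k ≤ m ∧ m < n ∧ (num < 0 ∨ (m:Int) < (k:Int) + num))) := by
        push_cast; constructor <;> intro h <;> omega
      rw [if_congr h1 rfl rfl]
  | case2 T num k h =>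
    rw [if_neg (by omega), add_zero]

theorem pvCov_zero_left (A : List Int) (n m : Nat) : pvCov A n 0 m = 0 := by
  simp [pvCov]

theorem pvCov_zero_of_ge (A : List Int) (n j m : Nat) (h : m ≤ j) : pvCov A n j m = 0 := by
  unfold pvCov
  rw [if_neg (by omega)]

theorem pvCovInd_eq (A : List Int) (n i m : Nat) :
    (if i + 1 + 1 ≤ m ∧ m < n ∧ (A.getD (i + 1) 0 < 0 ∨ (m : Int) < (↑(i + 1 + 1) : Int) + A.getD (i + 1) 0) then (1:Int) else 0) = pvCov A n (i + 1) m := by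
  unfold pvCov
  refine if_congr ?_ rfl rfl
  push_cast
  simp

theorem pvCle_eq_full (A : List Int) (n i : Nat) (h : i + 1 ≤ n) :
    ∑ j ∈ Finset.range (i + 1), pvCov A n j (i + 1) =
      ∑ j ∈ Finset.range n, pvCov A n j (i + 1) := by
  refine Finset.sum_subset (by intro x hx; simp at hx ⊢; omega) ?_
  intro j _ hj'
  exact pvCov_zero_of_ge A n j (i + 1) (by simpa using hj')

theorem pvLoopA_inv (A : List Int) (i : Nat) (hi : i ≤ A.length - 1) :
    ((List.range' 1 i).foldl (pvStepA A)
        ((Array.replicate A.length (0 : Int)).setIfInBounds 0 1)).size = A.length ∧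
    ∀ m, m < A.length →
      ((List.range' 1 i).foldl (pvStepA A)
          ((Array.replicate A.length (0 : Int)).setIfInBounds 0 1)).getD m 0 =
        if m ≤ i then
          1 + ∑ p ∈ Finset.range (m + 1), ∑ j ∈ Finset.range A.length, pvCov A A.length j p
        else ∑ j ∈ Finset.range (i + 1), pvCov A A.length j m := by
  set n := A.length with hn
  induction i with
  | zero =>
    refine ⟨by simp, ?_⟩
    intro m hm
    rw [List.range'_zero, List.foldl_nil]
    rw [Array.getD_eq_getD_getElem?, Array.getElem?_setIfInBounds]
    by_cases hm0 : m = 0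
    · subst hm0
      rw [if_pos rfl, if_pos (by simpa using hm), Option.getD_some, if_pos (le_refl 0),
        Finset.sum_range_one]
      have h0 : ∑ j ∈ Finset.range n, pvCov A n j 0 = 0 :=
        Finset.sum_eq_zero fun j _ => pvCov_zero_of_ge A n j 0 (Nat.zero_le j)
      rw [h0]; ring
    · rw [if_neg (fun h => hm0 h.symm), Array.getElem?_replicate, if_pos hm, Option.getD_some,
        if_neg (by omega), Finset.sum_range_one, pvCov_zero_left]
  | succ i ih =>
    have hii : i ≤ n - 1 := by omega
    obtain ⟨hsz, hv⟩ := ih hii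
    rw [List.range'_concat]
    simp only [List.foldl_append, List.foldl_cons, List.foldl_nil, one_mul, Nat.add_comm 1 i]
    set Ti := (List.range' 1 i).foldl (pvStepA A) ((Array.replicate n (0 : Int)).setIfInBounds 0 1) with hTi
    have hset_sz : (Ti.setIfInBounds (i + 1) (Ti.getD (i + 1) 0 + Ti.getD (i + 1 - 1) 0)).size = n := by
      simp [hsz]
    constructor
    · show (pvStepA A Ti (i + 1)).size = n
      unfold pvStepA
      rw [pvInnerA_size]
      simpa using hsz
    · intro m hm
      show (pvStepA A Ti (i + 1)).getD m 0 = _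
      unfold pvStepA
      rw [pvInnerA_getD _ _ _ _ (by simpa using hset_sz) m]
      have hi1 : i + 1 < n := by omega
      have hset : (Ti.setIfInBounds (i + 1) (Ti.getD (i + 1) 0 + Ti.getD (i + 1 - 1) 0)).getD m 0 =
          if i + 1 = m then Ti.getD (i + 1) 0 + Ti.getD (i + 1 - 1) 0 else Ti.getD m 0 := by
        rw [Array.getD_eq_getD_getElem?, Array.getElem?_setIfInBounds]
        by_cases h : i + 1 = m
        · rw [if_pos h, if_pos (by omega), Option.getD_some, if_pos h]
        · rw [if_neg h, if_neg h, ← Array.getD_eq_getD_getElem?]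
      rw [hset, pvCovInd_eq A n i m]
      by_cases h : i + 1 = m
      · subst h
        rw [if_pos rfl, Nat.add_sub_cancel, pvCov_zero_of_ge _ _ _ _ (le_refl _),
          hv (i + 1) hm, hv i (by omega), if_neg (by omega), if_pos (le_refl _),
          if_pos (le_refl _), pvCle_eq_full A n i (by omega),
          Finset.sum_range_succ (fun p => ∑ j ∈ Finset.range n, pvCov A n j p) (i + 1)]
        ring
      · rw [if_neg h, hv m hm]
        by_cases hle : m ≤ i
        · rw [if_pos hle, if_pos (by omega), pvCov_zero_of_ge _ _ _ _ (by omega), add_zero]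
        · rw [if_neg hle, if_neg (by omega),
            Finset.sum_range_succ (fun j => pvCov A n j m) (i + 1)]

-- closed form of a per-index coverage sum
theorem pvSumCov_closed (A : List Int) (n j : Nat) (c : Nat) (hc : c ≤ n) :
    ∑ p ∈ Finset.range c, pvCov A n j p =
      if 1 ≤ j then
        (if A.getD j 0 < 0 then max 0 ((c : Int) - 1 - (j : Int))
         else max 0 (min (A.getD j 0) ((c : Int) - 1 - (j : Int))))
      else 0 := by
  induction c with
  | zero =>
    rw [Finset.range_zero, Finset.sum_empty]
    split_ifs <;> omega
  | succ c ih =>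
    rw [Finset.sum_range_succ, ih (by omega)]
    unfold pvCov
    have hcn : c < n := by omega
    split_ifs <;> push_cast at * <;> omega

theorem pvFoldlAdd (f : Nat → Int) (l : List Nat) (t : Int) :
    l.foldl (fun acc j => acc + f j) t = t + (l.map f).sum := by
  induction l generalizing t with
  | nil => simp
  | cons x xs ih => simp [List.foldl_cons, ih]; ring

-- ===== VERDICT (by name: the statement is the Claim_ definition above) =====
-- per-j list sum of B's summands equals the Finset coverage sums
theorem pvSumEq (A : List Int) (k : Nat) (hk : k ≤ A.length - 1) (hn : 1 ≤ A.length) :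
    ∑ j ∈ Finset.range (k + 1), ∑ p ∈ Finset.range A.length, pvCov A A.length j p =
      ((List.range' 1 k).map (fun j =>
        if A.getD j 0 < 0 then (A.length : Int) - 1 - (j : Int)
        else min (A.getD j 0) ((A.length : Int) - 1 - (j : Int)))).sum := by
  induction k with
  | zero =>
    rw [Finset.sum_range_one, List.range'_zero, List.map_nil, List.sum_nil]
    exact Finset.sum_eq_zero fun p _ => pvCov_zero_left A A.length p
  | succ k ih =>
    rw [Finset.sum_range_succ, ih (by omega), List.range'_concat, List.map_append,
      List.sum_append, one_mul, Nat.add_comm 1 k,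
      pvSumCov_closed A A.length (k + 1) A.length (le_refl _)]
    have h1 : (↑(k + 1) : Int) ≤ (A.length : Int) - 1 := by
      have : k + 1 ≤ A.length - 1 := by omega
      omega
    rw [if_pos (by omega)]
    simp only [List.map_cons, List.map_nil, List.sum_cons, List.sum_nil, add_zero]
    split_ifs <;> push_cast <;> omega

theorem amazon_stairs_spec : Claim_equal_amazon_stairs := by
  intro A _ hP
  unfold Spec_amazon_stairs amazon_stairs amazon_stairs_alt
  have hn : 1 ≤ A.length := by
    cases A with
    | nil => exact absurd rfl hP
    | cons x xs => simp
  obtain ⟨_, hv⟩ := pvLoopA_inv A (A.length - 1) (le_refl _)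
  rw [hv (A.length - 1) (by omega), if_pos (le_refl _)]
  rw [pvFoldlAdd (fun j =>
    if A.getD j 0 < 0 then (A.length : Int) - 1 - (j : Int)
    else min (A.getD j 0) ((A.length : Int) - 1 - (j : Int))) (List.range' 1 (A.length - 1)) 1]
  rw [← pvSumEq A (A.length - 1) (le_refl _) hn]
  have he : A.length - 1 + 1 = A.length := by omega
  rw [he, Finset.sum_comm]
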